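-- pv_equiv track=rewrite | github.com/Ananta-dot/misr_new | save_every_round.py | motif_ladder
-- ===== SOURCE A (Python) =====
-- from typing import Dict, List, Tuple, Optional
--
-- Seq = List[int]
--
-- def motif_ladder(n: int) -> Seq:
--     out=[]
--     a, b = 1, 2
--     while len(out) < 2*n:
--         out += [a, b if b<=n else a]
--         a += 1
--         b += 1
--         if a > n: a = n
--         if b > n: b = n
--     # adjust to exactly two per label
--     cnt = {i:0 for i in range(1,n+1)}
--     fixed=[]
--     for x in out:
--         if cnt[x] < 2:
--             fixed.append(x); cnt[x]+=1
--     for i in range(1,n+1):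
--         while cnt[i] < 2:
--             fixed.append(i); cnt[i]+=1
--     return fixed[:2*n]
-- ===== SOURCE B (Python) =====
-- def motif_ladder(n: int):
--     if n <= 0:
--         return []
--     result = [1]
--     for k in range(2, n + 1):
--         result += [k, k]
--     result.append(1)
--     return result
-- ===== Notes on version B (the rewrite author's own statement) =====
-- stated objective: simpler
-- what changed: B emits the closed-form pattern [1] + [k,k for k in 2..n] + [1] directly (with an n<=0 guard), replacing A's clamped generator loop, counting-dict de-duplication pass and repair loop.
import Mathlib
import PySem

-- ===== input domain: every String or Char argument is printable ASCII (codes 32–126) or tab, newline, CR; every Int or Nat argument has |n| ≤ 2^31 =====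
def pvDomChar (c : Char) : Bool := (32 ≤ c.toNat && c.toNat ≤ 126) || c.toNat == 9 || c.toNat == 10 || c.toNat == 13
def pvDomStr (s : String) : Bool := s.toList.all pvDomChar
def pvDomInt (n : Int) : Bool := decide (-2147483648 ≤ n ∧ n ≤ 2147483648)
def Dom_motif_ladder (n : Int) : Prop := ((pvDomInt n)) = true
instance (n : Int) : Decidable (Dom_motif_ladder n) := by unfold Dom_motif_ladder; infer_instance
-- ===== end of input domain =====

-- B replaces A's clamped generator loop + counting-dict filter + repair loop by the direct
-- closed-form construction [1] ++ [k,k for k in 2..n] ++ [1] (objective: simpler).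

-- ===== PORT A =====
-- while len(out) < 2*n: out += [a, b if b<=n else a]; a += 1; b += 1; clamp a,b to n
-- (structural recursion on a fuel bound: each pass appends two elements, so (2*n).toNat
--  passes always suffice; the fuel only makes the loop total and is never exhausted)
def mlLoop (n : Int) : Nat → List Int → Int → Int → List Int
  | 0, out, _, _ => out
  | fuel + 1, out, a, b =>
    if (out.length : Int) < 2 * n then
      mlLoop n fuel (out ++ [a, if b ≤ n then b else a])
        (if a + 1 > n then n else a + 1) (if b + 1 > n then n else b + 1)
    else out

-- body of 'for x in out: if cnt[x] < 2: fixed.append(x); cnt[x] += 1'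
-- (cnt[x] is a plain subscript in A; every x produced by the loop is a key of cnt, so the
--  KeyError branch is unreachable and the lookup is ported as getD)
def mlFixStep (st : List Int × PySem.Dict Int Int) (x : Int) : List Int × PySem.Dict Int Int :=
  if st.2.getD x 0 < 2 then (st.1 ++ [x], st.2.insert x (st.2.getD x 0 + 1)) else st

-- 'while cnt[i] < 2: fixed.append(i); cnt[i] += 1'
-- (counts only ever grow towards 2, so two passes of fuel always suffice)
def mlWhile : Nat → (List Int × PySem.Dict Int Int) → Int → List Int × PySem.Dict Int Int
  | 0, st, _ => st
  | fuel + 1, st, i =>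
    if st.2.getD i 0 < 2 then mlWhile fuel (st.1 ++ [i], st.2.insert i (st.2.getD i 0 + 1)) i
    else st

def motif_ladder (n : Int) : List Int :=
  let out := mlLoop n (2 * n).toNat [] 1 2
  let cnt := (PySem.List.pyRange 1 (n + 1) 1).foldl (fun d i => d.insert i 0)
      (PySem.Dict.empty : PySem.Dict Int Int)
  let st := out.foldl mlFixStep ([], cnt)
  let st2 := (PySem.List.pyRange 1 (n + 1) 1).foldl (fun s i => mlWhile 2 s i) st
  PySem.List.slice st2.1 none (some (2 * n))

-- ===== PORT B =====
def motif_ladder_alt (n : Int) : List Int :=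
  if n ≤ 0 then []
  else ((PySem.List.pyRange 2 (n + 1) 1).foldl (fun r k => r ++ [k, k]) [1]) ++ [1]

-- ===== PRECONDITION & SPEC =====
def Spec_motif_ladder (n : Int) (out : List Int) : Prop := out = motif_ladder_alt n
instance (n : Int) (out : List Int) : Decidable (Spec_motif_ladder n out) := by unfold Spec_motif_ladder; infer_instance

-- ===== CLAIM (what is proved, stated in full; the proofs are below) =====
def Claim_equal_motif_ladder : Prop := ∀ (n : Int), Dom_motif_ladder n → Spec_motif_ladder n (motif_ladder n)

-- ===== LEMMAS AND PROOFS =====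

-- the raw list produced by A's while loop, built back-to-front over the remaining iterations m
def ladderTail (n : Int) : Nat → List Int
  | 0 => []
  | m + 1 => (n - m) :: (if m = 0 then n else n - m + 1) :: ladderTail n m

-- what the de-duplication pass appends while consuming ladderTail n m (m ≤ n - 1)
def fixTail (n : Int) : Nat → List Int
  | 0 => []
  | m + 1 => if m = 0 then [n] else (n - m) :: (n - m + 1) :: fixTail n m

theorem mlLoop_stop (n : Int) (fuel : Nat) (out : List Int) (a b : Int)
    (h : ¬ ((out.length : Int) < 2 * n)) : mlLoop n fuel out a b = out := by
  cases fuel <;> simp [mlLoop, h]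

theorem loop_char (n : Int) :
    ∀ (m : Nat), (m : Int) ≤ n →
    ∀ (fuel : Nat), m ≤ fuel →
    ∀ (a b : Int), (1 ≤ m → a = n + 1 - m ∧ b = min (n + 2 - m) n) →
    ∀ (out : List Int), (out.length : Int) = 2 * n - 2 * m →
    mlLoop n fuel out a b = out ++ ladderTail n m := by
  intro m
  induction m with
  | zero =>
    intro _ fuel _ a b _ out hlen
    rw [mlLoop_stop]
    · simp [ladderTail]
    · omega
  | succ m ih =>
    intro hm fuel hfuel a b hab out hlen
    obtain ⟨f, rfl⟩ : ∃ f, fuel = f + 1 := ⟨fuel - 1, by omega⟩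
    obtain ⟨ha, hb⟩ := hab (by omega)
    push_cast at ha hb hm hlen
    rw [mlLoop]
    have hguard : (out.length : Int) < 2 * n := by omega
    rw [if_pos hguard]
    have hble : b ≤ n := by omega
    rw [ih (by omega) f (by omega)]
    · by_cases h0 : m = 0
      · subst h0
        simp only [ladderTail, Nat.cast_zero]
        have e1 : a = n := by omega
        have e2 : b = n := by omega
        simp [e1, e2]
      · have hm1 : (1:Nat) ≤ m := by omega
        simp only [ladderTail, if_neg h0, if_pos hble]
        have e1 : a = n - (m:Int) := by omega
        have e2 : b = n - (m:Int) + 1 := by omega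
        simp [e1, e2]
    · intro h1
      constructor
      · split_ifs with h <;> omega
      · split_ifs with h <;> push_cast at * <;> omega
    · simp only [List.length_append, List.length_cons, List.length_nil]
      push_cast; omega

theorem fix_char (n : Int) (hn : 2 ≤ n) :
    ∀ (m : Nat), 1 ≤ m → (m : Int) ≤ n - 1 →
    ∀ (acc : List Int) (d : PySem.Dict Int Int),
    d.getD 1 0 = 1 → (∀ j : Int, 2 ≤ j → j ≤ n - m → d.getD j 0 = 2) →
    d.getD (n - m + 1) 0 = 1 → (∀ j : Int, n - m + 1 < j → d.getD j 0 = 0) →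
    ((ladderTail n m).foldl mlFixStep (acc, d)).1 = acc ++ fixTail n m ∧
    ((ladderTail n m).foldl mlFixStep (acc, d)).2.getD 1 0 = 1 ∧
    (∀ j : Int, 2 ≤ j → ((ladderTail n m).foldl mlFixStep (acc, d)).2.getD j 0 = 2 ∨ n < j) := by
  intro m
  induction m with
  | zero => intro h1 _; exact absurd h1 (by omega)
  | succ m ih =>
    intro _ hm acc d h1 h2 h3 h4
    push_cast at hm h2 h3 h4
    have h3' : d.getD (n - (m : Int)) 0 = 1 := by
      rw [show n - ((m : Int) + 1) + 1 = n - m by ring] at h3; exact h3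
    have h4' : ∀ j : Int, n - (m : Int) < j → d.getD j 0 = 0 := by
      intro j hj; exact h4 j (by omega)
    have step1 : mlFixStep (acc, d) (n - (m : Int)) = (acc ++ [n - m], d.insert (n - m) 2) := by
      simp [mlFixStep, h3']
    by_cases h0 : m = 0
    · subst h0
      simp only [ladderTail, List.foldl_cons, List.foldl_nil, Nat.cast_zero, sub_zero, if_true]
      rw [show ((n : Int) - (0 : Nat)) = n by push_cast; ring] at step1
      rw [step1]
      have step2 : mlFixStep (acc ++ [n], d.insert n 2) n = (acc ++ [n], d.insert n 2) := by
        simp [mlFixStep, PySem.Dict.getD_insert_self]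
      rw [step2]
      refine ⟨by simp [fixTail], ?_, ?_⟩
      · simp only [PySem.Dict.getD_insert]
        rw [if_neg (by omega)]; exact h1
      · intro j hj
        simp only [PySem.Dict.getD_insert]
        by_cases hjn : j = n
        · left; simp [hjn]
        · rw [if_neg hjn]
          by_cases hjn2 : j ≤ n - 1
          · left; exact h2 j hj (by push_cast; omega)
          · right; omega
    · have hm1 : (1 : Int) ≤ (m : Int) := by
        have : 1 ≤ m := Nat.one_le_iff_ne_zero.mpr h0; exact_mod_cast this
      simp only [ladderTail, List.foldl_cons, if_neg h0]
      rw [step1]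
      have hne : n - (m : Int) + 1 ≠ n - (m : Int) := by omega
      have step2 : mlFixStep (acc ++ [n - (m : Int)], d.insert (n - m) 2) (n - (m : Int) + 1)
          = (acc ++ [n - (m : Int), n - (m : Int) + 1],
             (d.insert (n - m) 2).insert (n - m + 1) 1) := by
        have : (d.insert (n - (m : Int)) 2).getD (n - (m : Int) + 1) 0 = 0 := by
          rw [PySem.Dict.getD_insert, if_neg hne]; exact h4' _ (by omega)
        simp only [mlFixStep, this]
        norm_num
      rw [step2]
      have main := ih (Nat.one_le_iff_ne_zero.mpr h0) (by omega)
        (acc ++ [n - (m : Int), n - (m : Int) + 1]) ((d.insert (n - m) 2).insert (n - m + 1) 1)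
        (by simp only [PySem.Dict.getD_insert]
            rw [if_neg (by omega), if_neg (by omega)]; exact h1)
        (by intro j hj2 hjm
            simp only [PySem.Dict.getD_insert]
            rw [if_neg (by omega)]
            by_cases hje : j = n - (m : Int)
            · simp [hje]
            · rw [if_neg hje]; exact h2 j hj2 (by omega))
        (by simp)
        (by intro j hj
            simp only [PySem.Dict.getD_insert]
            rw [if_neg (by omega), if_neg (by omega)]
            exact h4' j (by omega))
      refine ⟨?_, main.2.1, main.2.2⟩
      rw [main.1]
      simp [fixTail, if_neg h0]

theorem getD_init (l : List Int) (d : PySem.Dict Int Int) (h : ∀ j, d.getD j 0 = 0) :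
    ∀ j, (l.foldl (fun d i => d.insert i 0) d).getD j 0 = 0 := by
  induction l generalizing d with
  | nil => exact h
  | cons x xs ih =>
    intro j
    refine ih _ (fun j => ?_) j
    rw [PySem.Dict.getD_insert]
    split_ifs <;> simp [h]

theorem mlWhile_stop (fuel : Nat) (st : List Int × PySem.Dict Int Int) (i : Int)
    (h : ¬ st.2.getD i 0 < 2) : mlWhile fuel st i = st := by
  cases fuel <;> simp [mlWhile, h]

theorem foldl_mlWhile_noop (l : List Int) (st : List Int × PySem.Dict Int Int)
    (h : ∀ i ∈ l, ¬ st.2.getD i 0 < 2) : l.foldl (fun s i => mlWhile 2 s i) st = st := by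
  induction l with
  | nil => rfl
  | cons x xs ih =>
    simp only [List.foldl_cons]
    rw [mlWhile_stop 2 st x (h x (by simp))]
    exact ih (fun i hi => h i (by simp [hi]))

theorem fixTail_eq (n : Int) : ∀ (m : Nat), 1 ≤ m → (m : Int) ≤ n - 1 →
    fixTail n m = (n - m + 1) :: (PySem.List.pyRange (n - m + 2) (n + 1) 1).flatMap (fun k => [k, k]) := by
  intro m
  induction m with
  | zero => intro h; exact absurd h (by omega)
  | succ m ih =>
    intro _ hm
    push_cast at hm ⊢
    by_cases h0 : m = 0
    · subst h0
      simp only [fixTail, Nat.cast_zero, if_true]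
      rw [show n - ((0 : Int) + 1) + 2 = n + 1 by ring, PySem.List.pyRange_one_eq_nil (by omega)]
      norm_num
    · have hm1 : (1 : Int) ≤ (m : Int) := by
        have : 1 ≤ m := Nat.one_le_iff_ne_zero.mpr h0; exact_mod_cast this
      rw [show fixTail n (m + 1) = (n - m) :: (n - m + 1) :: fixTail n m from by
        simp [fixTail, h0]]
      rw [ih (Nat.one_le_iff_ne_zero.mpr h0) (by omega)]
      rw [show n - ((m : Int) + 1) + 2 = n - m + 1 by ring,
        PySem.List.pyRange_one_cons (by omega : n - (m : Int) + 1 < n + 1)]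
      simp only [List.flatMap_cons]
      rw [show n - (m : Int) + 1 + 1 = n - m + 2 by ring]
      rw [show n - ((m : Int) + 1) + 1 = n - m by ring]
      rfl

theorem length_fixTail (n : Int) : ∀ (m : Nat), 1 ≤ m → (fixTail n m).length = 2 * m - 1 := by
  intro m
  induction m with
  | zero => intro h; exact absurd h (by omega)
  | succ m ih =>
    intro _
    by_cases h0 : m = 0
    · subst h0; simp [fixTail]
    · rw [show fixTail n (m + 1) = (n - m) :: (n - m + 1) :: fixTail n m from by
        simp [fixTail, h0]]
      simp only [List.length_cons, ih (Nat.one_le_iff_ne_zero.mpr h0)]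
      omega

theorem alt_pos (n : Int) (hn : 1 ≤ n) :
    motif_ladder_alt n = [1] ++ (PySem.List.pyRange 2 (n + 1) 1).flatMap (fun k => [k, k]) ++ [1] := by
  rw [motif_ladder_alt, if_neg (by omega)]
  rw [PySem.List.foldl_append_eq_flatMap]

theorem motif_ladder_spec_aux (n : Int) : motif_ladder n = motif_ladder_alt n := by
  rcases lt_trichotomy n 1 with hn | hn | hn
  · -- n ≤ 0 : both sides are []
    rw [motif_ladder, motif_ladder_alt, if_pos (by omega)]
    rw [mlLoop_stop n _ [] 1 2 (by simp; omega)]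
    rw [PySem.List.pyRange_one_eq_nil (by omega)]
    simp [PySem.List.slice]
  · -- n = 1
    subst hn
    have e1 : mlLoop 1 ((2 * 1 : Int)).toNat [] 1 2 = [1, 1] := by
      rw [show ((2 * 1 : Int)).toNat = 2 from rfl]
      rw [show (2 : Nat) = 1 + 1 from rfl, mlLoop]; norm_num
      rw [mlLoop_stop]; simp
    have e2 : PySem.List.pyRange 1 (1 + 1) 1 = [1] := by
      rw [PySem.List.pyRange_one_cons (by norm_num), PySem.List.pyRange_one_eq_nil (by norm_num)]
    have e3 : PySem.List.pyRange 2 (1 + 1) 1 = [] := PySem.List.pyRange_one_eq_nil (by norm_num)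
    rw [motif_ladder, alt_pos 1 le_rfl, e1, e2, e3]
    simp only [List.foldl_cons, List.foldl_nil, List.flatMap_nil]
    rw [show mlFixStep ([], (PySem.Dict.empty : PySem.Dict Int Int).insert 1 0) 1
        = ([1], ((PySem.Dict.empty : PySem.Dict Int Int).insert 1 0).insert 1 1) from by
      simp [mlFixStep, PySem.Dict.getD_insert_self]]
    rw [show mlFixStep ([1], ((PySem.Dict.empty : PySem.Dict Int Int).insert 1 0).insert 1 1) 1
        = ([1, 1], (((PySem.Dict.empty : PySem.Dict Int Int).insert 1 0).insert 1 1).insert 1 2) from by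
      simp [mlFixStep, PySem.Dict.getD_insert_self]]
    rw [mlWhile_stop 2 _ 1 (by simp [PySem.Dict.getD_insert_self])]
    rw [show (([1, 1], (((PySem.Dict.empty : PySem.Dict Int Int).insert 1 0).insert 1 1).insert 1 2)
        : List Int × PySem.Dict Int Int).1 = [1, 1] from rfl]
    rw [PySem.List.slice_to _ (by norm_num : (0 : Int) ≤ 2 * 1)]
    norm_num
  · -- n ≥ 2
    have hn2 : 2 ≤ n := by omega
    rw [motif_ladder, alt_pos n (by omega)]
    have hN : ∃ m' : Nat, n.toNat = m' + 1 ∧ 1 ≤ m' ∧ (m' : Int) = n - 1 := by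
      refine ⟨n.toNat - 1, by omega, by omega, by omega⟩
    obtain ⟨m', hN, hm'1, hm'⟩ := hN
    -- the while loop
    have hout : mlLoop n (2 * n).toNat [] 1 2 = ladderTail n n.toNat := by
      have := loop_char n n.toNat (by omega) (2 * n).toNat (by omega) 1 2
        (by intro _; constructor <;> [omega; (rw [min_def]; split_ifs <;> omega)])
        [] (by simp; omega)
      simpa using this
    rw [hout, hN]
    rw [show ladderTail n (m' + 1) = 1 :: 2 :: ladderTail n m' from by
      simp only [ladderTail, if_neg (by omega : ¬ m' = 0)]
      rw [show n - (m' : Int) + 1 = 2 by omega, show n - (m' : Int) = 1 by omega]]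
    simp only [List.foldl_cons]
    -- initial dict is all zero
    have hz : ∀ j, ((PySem.List.pyRange 1 (n + 1) 1).foldl (fun d i => d.insert i 0)
        (PySem.Dict.empty : PySem.Dict Int Int)).getD j 0 = 0 :=
      getD_init _ _ (by simp [PySem.Dict.getD_empty])
    set cnt0 := (PySem.List.pyRange 1 (n + 1) 1).foldl (fun d i => d.insert i 0)
        (PySem.Dict.empty : PySem.Dict Int Int) with hcnt0
    -- first two fix steps
    rw [show mlFixStep ([], cnt0) 1 = ([1], cnt0.insert 1 1) from by
      simp [mlFixStep, hz 1]]
    rw [show mlFixStep ([1], cnt0.insert 1 1) 2 = ([1, 2], (cnt0.insert 1 1).insert 2 1) from by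
      have : (cnt0.insert 1 1).getD 2 0 = 0 := by
        rw [PySem.Dict.getD_insert, if_neg (by omega)]; exact hz 2
      simp [mlFixStep, this]]
    -- the de-duplication pass
    have hfix := fix_char n hn2 m' hm'1 (by omega) [1, 2] ((cnt0.insert 1 1).insert 2 1)
      (by rw [PySem.Dict.getD_insert, if_neg (by omega), PySem.Dict.getD_insert_self])
      (by intro j hj hjm; omega)
      (by rw [show n - (m' : Int) + 1 = 2 by omega, PySem.Dict.getD_insert_self])
      (by intro j hj
          rw [PySem.Dict.getD_insert, if_neg (by omega), PySem.Dict.getD_insert, if_neg (by omega)]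
          exact hz j)
    set st := (ladderTail n m').foldl mlFixStep ([1, 2], (cnt0.insert 1 1).insert 2 1) with hst
    obtain ⟨hst1, hst2, hst3⟩ := hfix
    -- the repair pass: range(1, n+1) = 1 :: range(2, n+1)
    rw [PySem.List.pyRange_one_cons (by omega : (1 : Int) < n + 1)]
    simp only [List.foldl_cons]
    have hw : mlWhile 2 st 1 = (st.1 ++ [1], st.2.insert 1 2) := by
      rw [mlWhile]
      rw [if_pos (by rw [hst2]; omega)]
      rw [hst2]
      norm_num
      exact mlWhile_stop 1 _ _ (by simp [PySem.Dict.getD_insert_self])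
    rw [hw]
    rw [foldl_mlWhile_noop _ _ (by
      intro i hi
      rw [PySem.List.mem_pyRange_one] at hi
      simp only [PySem.Dict.getD_insert, if_neg (by omega : ¬ i = 1)]
      rcases hst3 i (by omega) with h | h
      · omega
      · omega)]
    -- the final slice is a no-op
    rw [show ((st.1 ++ [1], st.2.insert 1 2) : List Int × PySem.Dict Int Int).1
        = st.1 ++ [1] from rfl]
    rw [hst1]
    have hlen : (([1, 2] ++ fixTail n m' ++ [1] : List Int)).length = (2 * n).toNat := by
      simp [length_fixTail n m' hm'1]; omega
    rw [PySem.List.slice_to _ (by omega : (0 : Int) ≤ 2 * n)]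
    rw [show (([1, 2] ++ fixTail n m' : List Int) ++ [1] : List Int)
        = [1, 2] ++ fixTail n m' ++ [1] from rfl]
    rw [List.take_of_length_le (le_of_eq hlen)]
    -- identify the two closed forms
    rw [fixTail_eq n m' hm'1 (by omega)]
    rw [show n - (m' : Int) + 1 = 2 by omega, show n - (m' : Int) + 2 = 3 by omega]
    rw [PySem.List.pyRange_one_cons (by omega : (2 : Int) < n + 1)]
    simp

-- ===== VERDICT (by name: the statement is the Claim_ definition above) =====
theorem motif_ladder_spec : Claim_equal_motif_ladder := by
  intro n _
  unfold Spec_motif_ladder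
  exact motif_ladder_spec_aux n
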